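-- pv_equiv track=rewrite | github.com/catodevops/tarea_online_5 | main.py | cadena_mas_larga
-- ===== SOURCE A (Python) =====
-- def cadena_mas_larga(lista_cadenas):
--
--     #Comprobación simple de si la lista está vacía
--     if len(lista_cadenas) == 0:
--         return ""
--     #Creamos la lista para almacenar las cadenas más largas
--     cadenas_mas_largas = []
--     longitud_maxima = 0
--
--     #Recorremos la lista
--     for cadena_actual in lista_cadenas:
--         #Nos aseguramos de que la cadena sea un string
--         if isinstance(cadena_actual, str):
--             #Contamos las letras de la cadena actual
--             longitud = len(cadena_actual)
--
--             #Guardamos la cadena más larga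
--             if longitud > longitud_maxima:
--                 longitud_maxima = longitud
--                 cadenas_mas_largas = [cadena_actual]
--             #Añadimos las cadenas con la misma longitud
--             elif longitud == longitud_maxima:
--                 cadenas_mas_largas.append(cadena_actual)
--
--     #Ordenamos alfabéticamente y devolvemos la primera
--     cadenas_mas_largas.sort()
--     #Nos aseguramos de que no esté vacío
--     if len(cadenas_mas_largas) == 0:
--         return ""
--     else:
--         return cadenas_mas_largas[0]
-- ===== SOURCE B (Python) =====
-- def cadena_mas_larga(lista_cadenas):
--     strs = [s for s in lista_cadenas if isinstance(s, str)]
--     if not strs: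
--         return ""
--     L = max(len(s) for s in strs)
--     return min(s for s in strs if len(s) == L)
-- ===== Notes on version B (the rewrite author's own statement) =====
-- stated objective: simpler
-- what changed: A's single accumulator pass (running max length with a reset-or-append candidate list, then a sort to pick the first) is replaced by separate filter / max / min phases using builtins: take the max length, then the min of the strings of that length.
import Mathlib
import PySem

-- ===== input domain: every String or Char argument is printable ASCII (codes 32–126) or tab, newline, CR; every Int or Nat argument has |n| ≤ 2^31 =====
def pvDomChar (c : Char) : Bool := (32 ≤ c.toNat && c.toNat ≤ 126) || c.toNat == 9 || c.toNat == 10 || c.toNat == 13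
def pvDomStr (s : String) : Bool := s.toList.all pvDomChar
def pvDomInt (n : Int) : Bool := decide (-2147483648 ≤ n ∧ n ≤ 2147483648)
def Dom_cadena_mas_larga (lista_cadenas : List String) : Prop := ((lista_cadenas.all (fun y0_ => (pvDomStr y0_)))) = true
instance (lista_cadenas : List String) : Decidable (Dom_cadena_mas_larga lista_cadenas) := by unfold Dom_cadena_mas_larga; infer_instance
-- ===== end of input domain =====

-- B replaces A's single accumulator pass (running max length + reset-or-append list + sort)
-- by filter / max / min phases with builtins; objective: simpler. Equivalence of return values is proved.

-- ===== PORT A =====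
-- one fold step of A's loop: state = (longitud_maxima, cadenas_mas_largas);
-- isinstance(cadena_actual, str) is always true for a List String argument.
def cmlStepA (acc : Int × List String) (cadena_actual : String) : Int × List String :=
  let longitud := PySem.Str.len cadena_actual
  if longitud > acc.1 then (longitud, [cadena_actual])
  else if longitud == acc.1 then (acc.1, acc.2 ++ [cadena_actual])
  else acc

def cadena_mas_larga (lista_cadenas : List String) : String :=
  if lista_cadenas.length == 0 then ""
  else
    let st := lista_cadenas.foldl cmlStepA (0, [])
    let s := PySem.List.sorted st.2 (fun x => x)
    if s.length == 0 then "" else s.headD ""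

-- ===== PORT B =====
-- strs = [s for s in lista_cadenas if isinstance(s, str)]: the filter keeps everything on List String.
def cadena_mas_larga_alt (lista_cadenas : List String) : String :=
  let strs := lista_cadenas
  if strs = [] then ""
  else
    let L := (PySem.List.max? (strs.map PySem.Str.len) (fun x => x)).getD 0
    (PySem.List.min? (strs.filter (fun s => PySem.Str.len s == L)) (fun x => x)).getD ""

-- ===== PRECONDITION & SPEC =====
def Spec_cadena_mas_larga (lista_cadenas : List String) (out : String) : Prop := out = cadena_mas_larga_alt lista_cadenas
instance (lista_cadenas : List String) (out : String) : Decidable (Spec_cadena_mas_larga lista_cadenas out) := by unfold Spec_cadena_mas_larga; infer_instance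

-- ===== CLAIM (what is proved, stated in full; the proofs are below) =====
def Claim_equal_cadena_mas_larga : Prop := ∀ (lista_cadenas : List String), Dom_cadena_mas_larga lista_cadenas → Spec_cadena_mas_larga lista_cadenas (cadena_mas_larga lista_cadenas)

-- ===== LEMMAS AND PROOFS =====

-- the running maximum of string lengths that A maintains
def cmlMax (l : List String) : Int := (l.map PySem.Str.len).foldl max 0

lemma len_le_cmlMax (l : List String) {s : String} (h : s ∈ l) : PySem.Str.len s ≤ cmlMax l :=
  (PySem.List.le_foldl_max (l.map PySem.Str.len) 0).2 _ (List.mem_map_of_mem h)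

-- one step of A's loop, from the invariant state
lemma cmlStepA_spec (l : List String) (c : String) :
    cmlStepA (cmlMax l, l.filter (fun s => PySem.Str.len s == cmlMax l)) c
      = (cmlMax (l ++ [c]), (l ++ [c]).filter (fun s => PySem.Str.len s == cmlMax (l ++ [c]))) := by
  have hM : cmlMax (l ++ [c]) = max (cmlMax l) (PySem.Str.len c) := by
    simp only [cmlMax, List.map_append, List.foldl_append, List.map_cons, List.map_nil,
      List.foldl_cons, List.foldl_nil]
  rw [hM, List.filter_append]
  simp only [cmlStepA]
  rcases lt_trichotomy (cmlMax l) (PySem.Str.len c) with hlt | heq | hgt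
  · have h1 : l.filter (fun s => PySem.Str.len s == PySem.Str.len c) = [] :=
      List.filter_eq_nil_iff.mpr (fun s hs => by
        have := len_le_cmlMax l hs
        simp only [beq_iff_eq]
        omega)
    rw [if_pos hlt, max_eq_right hlt.le, h1]
    simp
  · rw [heq, max_self, if_neg (lt_irrefl _), if_pos (beq_self_eq_true _)]
    simp
  · have hne : ¬ ((PySem.Str.len c == cmlMax l) = true) := by
      simp only [beq_iff_eq]; omega
    have h1 : List.filter (fun s => PySem.Str.len s == cmlMax l) [c] = [] := by
      simp only [List.filter_cons, List.filter_nil, beq_iff_eq]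
      rw [if_neg (by omega)]
    rw [if_neg (not_lt.mpr hgt.le), if_neg hne, max_eq_left hgt.le, h1]
    simp

-- A's loop invariant: the fold keeps the running max and exactly the strings of maximal length, in order.
lemma foldA_eq (l : List String) :
    l.foldl cmlStepA (0, []) = (cmlMax l, l.filter (fun s => PySem.Str.len s == cmlMax l)) := by
  induction l using List.reverseRecOn with
  | nil => rfl
  | append_singleton l c ih => rw [List.foldl_append, ih, List.foldl_cons, List.foldl_nil,
      cmlStepA_spec]

-- some string of l attains the running maximum, so A's kept list is nonempty
lemma filter_max_ne_nil (l : List String) (h : l ≠ []) :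
    l.filter (fun s => PySem.Str.len s == cmlMax l) ≠ [] := by
  have hex : ∃ s ∈ l, PySem.Str.len s = cmlMax l := by
    rcases PySem.List.foldl_max_mem (l.map PySem.Str.len) 0 with h0 | hmem
    · rcases List.exists_mem_of_ne_nil l h with ⟨s, hs⟩
      refine ⟨s, hs, le_antisymm (len_le_cmlMax l hs) ?_⟩
      unfold cmlMax; rw [h0]
      simp [PySem.Str.len_eq]
    · rcases List.mem_map.mp hmem with ⟨s, hs, hlen⟩
      exact ⟨s, hs, hlen⟩
  rcases hex with ⟨s, hs, hlen⟩
  exact List.ne_nil_of_mem (List.mem_filter.mpr ⟨hs, by simp only [beq_iff_eq]; exact hlen⟩)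

-- head of the stable sort = Python's min (first minimal element): both are the least value
lemma headD_sorted_eq_min (F : List String) (h : F ≠ []) :
    (PySem.List.sorted F (fun x => x)).headD "" = (PySem.List.min? F (fun x => x)).getD "" := by
  obtain ⟨m, t, hsort⟩ : ∃ m t, PySem.List.sorted F (fun x => x) = m :: t := by
    cases hs : PySem.List.sorted F (fun x => x) with
    | nil => exact absurd ((PySem.List.sorted_eq_nil_iff F _ false).mp hs) h
    | cons m t => exact ⟨m, t, rfl⟩
  obtain ⟨m', hmin⟩ : ∃ m', PySem.List.min? F (fun x => x) = some m' := by
    cases hm : PySem.List.min? F (fun x => x) with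
    | none => exact absurd ((PySem.List.min?_eq_none_iff F (fun x => x)).mp hm) h
    | some m' => exact ⟨m', rfl⟩
  have hmF : m ∈ F := (PySem.List.mem_sorted F _ false m).mp (hsort ▸ List.mem_cons_self)
  have hm'F : m' ∈ F := PySem.List.min?_mem hmin
  have h1 : m ≤ m' := PySem.List.key_head_sorted_le F _ hsort m' hm'F
  have h2 : m' ≤ m := PySem.List.min?_isMin hmin m hmF
  rw [hsort, hmin]
  exact le_antisymm h1 h2

-- B's L equals A's running maximum on a nonempty list
lemma maxD_eq_cmlMax (l : List String) (h : l ≠ []) :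
    (PySem.List.max? (l.map PySem.Str.len) (fun x => x)).getD 0 = cmlMax l := by
  cases l with
  | nil => exact absurd rfl h
  | cons s t =>
    rw [List.map_cons, PySem.List.max?_id_cons, Option.getD_some, cmlMax, List.map_cons,
      List.foldl_cons]
    have : max 0 (PySem.Str.len s) = PySem.Str.len s := by
      simp [PySem.Str.len_eq]
    rw [this]

-- ===== VERDICT (by name: the statement is the Claim_ definition above) =====
theorem cadena_mas_larga_spec : Claim_equal_cadena_mas_larga := by
  intro l _
  show cadena_mas_larga l = cadena_mas_larga_alt l
  by_cases hnil : l = []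
  · subst hnil; rfl
  · have hlen : (l.length == 0) = false := by simp [hnil]
    have hFne := filter_max_ne_nil l hnil
    have hsne : ((PySem.List.sorted (l.filter (fun s => PySem.Str.len s == cmlMax l))
        (fun x => x)).length == 0) = false := by
      rw [beq_eq_false_iff_ne]
      intro h0
      exact hFne ((PySem.List.sorted_eq_nil_iff _ _ false).mp (List.length_eq_zero_iff.mp h0))
    unfold cadena_mas_larga cadena_mas_larga_alt
    simp only [hlen, Bool.false_eq_true, if_false, if_neg hnil, foldA_eq,
      maxD_eq_cmlMax l hnil, hsne]
    exact headD_sorted_eq_min _ hFne
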